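-- pv_equiv track=rewrite | github.com/aalavender/HolidayCalendar | custom_components/holidaycalendar/sensor.py | unZipSolarTermsList
-- ===== SOURCE A (Python) =====
-- encryptionVectorList=[4, 19, 3, 18, 4, 19, 4, 19, 4, 20, 4, 20, 6, 22, 6, 22, 6, 22, 7, 22, 6, 21, 6, 21]
--
-- def abListMerge(a, b=encryptionVectorList, type=1):
--     c = []
--     for i in range(len(a)):
--         c.append(a[i]+b[i]*type)
--     return c
--
-- def unZipSolarTermsList(data,rangeEndNum=24,charCountLen=2):
--     list2 = []
--     for i in range(1,rangeEndNum+1):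
--         right=charCountLen*(rangeEndNum-i)
--         if type(data).__name__=='str':
--             data= int(data, 16)
--         x=data >> right
--         c=2**charCountLen
--         list2=[(x % c)]+list2
--     return abListMerge(list2)
-- ===== SOURCE B (Python) =====
-- encryptionVectorList=[4, 19, 3, 18, 4, 19, 4, 19, 4, 20, 4, 20, 6, 22, 6, 22, 6, 22, 7, 22, 6, 21, 6, 21]
--
-- def unZipSolarTermsList(data, rangeEndNum=24, charCountLen=2):
--     # single pass: peel least-significant base-2**charCountLen digits and add the
--     # encryption vector in the same iteration (no separate merge pass)
--     res = []
--     if rangeEndNum >= 1: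
--         n = int(data, 16)
--         c = 2 ** charCountLen
--         for i in range(rangeEndNum):
--             digit, n = n % c, n // c
--             res.append(encryptionVectorList[i] + digit)
--     return res
-- ===== Notes on version B (the rewrite author's own statement) =====
-- stated objective: simpler
-- what changed: B makes a single low-to-high pass that peels the least-significant base-2**charCountLen digit with divmod and adds the encryption-vector term in the same iteration, instead of A's high-to-low pass that prepends shifted digits and then runs a second abListMerge pass.
-- outside the precondition, e.g. on unZipSolarTermsList('1', 1, -1): A returns [4.0], B returns [4.0]
import Mathlib
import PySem

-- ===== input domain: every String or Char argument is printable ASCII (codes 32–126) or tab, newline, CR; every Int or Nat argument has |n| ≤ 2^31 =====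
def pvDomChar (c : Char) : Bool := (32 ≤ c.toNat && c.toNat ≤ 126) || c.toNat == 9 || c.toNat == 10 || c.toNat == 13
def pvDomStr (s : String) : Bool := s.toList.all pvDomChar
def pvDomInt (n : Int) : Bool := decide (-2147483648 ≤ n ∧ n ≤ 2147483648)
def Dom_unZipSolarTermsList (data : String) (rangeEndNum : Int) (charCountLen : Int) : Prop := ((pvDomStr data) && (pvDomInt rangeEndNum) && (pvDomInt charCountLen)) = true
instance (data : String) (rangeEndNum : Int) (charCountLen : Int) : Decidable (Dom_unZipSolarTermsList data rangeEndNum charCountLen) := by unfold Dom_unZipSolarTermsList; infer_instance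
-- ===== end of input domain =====

-- B folds digit extraction and the encryption-vector addition into one low-to-high
-- divmod pass (no second merge pass); objective: simpler.

-- ===== PORT A =====
def encryptionVectorList : List Int :=
  [4, 19, 3, 18, 4, 19, 4, 19, 4, 20, 4, 20, 6, 22, 6, 22, 6, 22, 7, 22, 6, 21, 6, 21]

-- c.append(a[i]+b[i]*type) over range(len(a)); none = IndexError
def abListMerge (a b : List Int) (ty : Int) : Option (List Int) :=
  (PySem.List.pyRange 0 a.length 1).foldl
    (fun c? i => c?.bind fun c =>
      (PySem.List.pyGet? a i).bind fun ai =>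
      (PySem.List.pyGet? b i).bind fun bi =>
      some (c ++ [ai + bi * ty]))
    (some [])

-- one iteration of A's loop; state = (data after possible str→int conversion, list2);
-- none = exception (ValueError from int(data,16), or the non-Int float results when
-- charCountLen < 0: negative shift raises, and 2**charCountLen would be a float)
def unZipStepA (data : String) (rangeEndNum charCountLen : Int)
    (st : Option (Option Int × List Int)) (i : Int) : Option (Option Int × List Int) :=
  st.bind fun s =>
  (match s.1 with
   | none => PySem.Int.ofStrBase? data 16   -- type(data).__name__=='str' branch
   | some v => some v).bind fun d =>
  let right := charCountLen * (rangeEndNum - i)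
  if right < 0 ∨ charCountLen < 0 then none
  else some (some d, [PySem.Int.mod (d >>> right.toNat) (2 ^ charCountLen.toNat)] ++ s.2)

def unZipSolarTermsList (data : String) (rangeEndNum : Int) (charCountLen : Int) : List Int :=
  match (PySem.List.pyRange 1 (rangeEndNum + 1) 1).foldl
          (unZipStepA data rangeEndNum charCountLen) (some (none, [])) with
  | none => []                                    -- exception; excluded by Pre_
  | some s => (abListMerge s.2 encryptionVectorList 1).getD []   -- getD: IndexError excluded by Pre_

-- ===== PORT B =====
def unZipSolarTermsList_alt (data : String) (rangeEndNum : Int) (charCountLen : Int) : List Int :=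
  if 1 ≤ rangeEndNum then
    match PySem.Int.ofStrBase? data 16 with
    | none => []                                  -- int(data,16) raises; excluded by Pre_
    | some n0 =>
      let c : Int := 2 ^ charCountLen.toNat       -- charCountLen < 0 excluded by Pre_
      match (PySem.List.pyRange 0 rangeEndNum 1).foldl
              (fun st i => st.bind fun s =>
                (PySem.List.pyGet? encryptionVectorList i).bind fun e =>
                some (PySem.Int.floordiv s.1 c, s.2 ++ [e + PySem.Int.mod s.1 c]))
              (some (n0, [])) with
      | none => []                                -- IndexError; excluded by Pre_
      | some s => s.2
  else []

-- ===== PRECONDITION & SPEC =====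
-- Pre_ admits everything A returns a List Int on: it excludes only inputs where A raises
-- (ValueError when data is not a base-16 int literal and the loop runs, ValueError on the
-- negative shift / IndexError when rangeEndNum > 24) or where A returns floats instead of
-- ints (charCountLen < 0 makes 2**charCountLen a float).
def Pre_unZipSolarTermsList (data : String) (rangeEndNum : Int) (charCountLen : Int) : Prop :=
  rangeEndNum < 1 ∨
    (rangeEndNum ≤ 24 ∧ 0 ≤ charCountLen ∧ (PySem.Int.ofStrBase? data 16).isSome = true)
instance (data : String) (rangeEndNum : Int) (charCountLen : Int) :
    Decidable (Pre_unZipSolarTermsList data rangeEndNum charCountLen) := by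
  unfold Pre_unZipSolarTermsList; infer_instance

def pvWitness_unZipSolarTermsList : String × Int × Int := ("1a2b", 24, 2)

def Spec_unZipSolarTermsList (data : String) (rangeEndNum : Int) (charCountLen : Int) (out : List Int) : Prop := out = unZipSolarTermsList_alt data rangeEndNum charCountLen
instance (data : String) (rangeEndNum : Int) (charCountLen : Int) (out : List Int) : Decidable (Spec_unZipSolarTermsList data rangeEndNum charCountLen out) := by unfold Spec_unZipSolarTermsList; infer_instance

-- ===== CLAIM (what is proved, stated in full; the proofs are below) =====
def Claim_equal_unZipSolarTermsList : Prop := ∀ (data : String) (rangeEndNum : Int) (charCountLen : Int), Dom_unZipSolarTermsList data rangeEndNum charCountLen → Pre_unZipSolarTermsList data rangeEndNum charCountLen → Spec_unZipSolarTermsList data rangeEndNum charCountLen (unZipSolarTermsList data rangeEndNum charCountLen)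

-- ===== LEMMAS AND PROOFS =====


-- the k-th extracted digit of n in base 2^t
def pvDig (n : Int) (t k : Nat) : Int := PySem.Int.mod (n >>> (t * k)) (2 ^ t)

theorem pvWitness_ok :
    Dom_unZipSolarTermsList pvWitness_unZipSolarTermsList.1 pvWitness_unZipSolarTermsList.2.1 pvWitness_unZipSolarTermsList.2.2 ∧
    Pre_unZipSolarTermsList pvWitness_unZipSolarTermsList.1 pvWitness_unZipSolarTermsList.2.1 pvWitness_unZipSolarTermsList.2.2 := by
  decide

theorem evl_get (i : Int) (h0 : 0 ≤ i) (h24 : i < 24) :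
    PySem.List.pyGet? encryptionVectorList i =
      some (encryptionVectorList.getD i.toNat 0) := by
  interval_cases i <;> rfl

theorem stepA_some (data : String) (R cL n : Int) (i : Int) (acc : List Int)
    (hcl : 0 ≤ cL) (hi : i ≤ R) (j : Nat) (hj : R - i = (j : Int)) :
    unZipStepA data R cL (some (some n, acc)) i =
      some (some n, pvDig n cL.toNat j :: acc) := by
  obtain ⟨m, rfl⟩ := Int.eq_ofNat_of_zero_le hcl
  have hml : (0:Int) ≤ (m : Int) * (R - i) := mul_nonneg (by positivity) (by omega)
  have hnn : ¬ ((m:Int) * (R - i) < 0 ∨ (m:Int) < 0) := by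
    push_neg
    exact ⟨hml, Int.natCast_nonneg m⟩
  have htn : ((m:Int) * (R - i)).toNat = ((m:Int)).toNat * j := by
    rw [hj, ← Nat.cast_mul, Int.toNat_natCast, Int.toNat_natCast]
  simp [unZipStepA, hnn, pvDig, htn]

-- A's loop over i = a..rangeEndNum from a converted state
theorem foldA (data : String) (R cL n : Int) (hcl : 0 ≤ cL) :
    ∀ (j : Nat) (a : Int) (acc : List Int), 1 ≤ a → a + j = R + 1 →
    (PySem.List.pyRange a (R + 1) 1).foldl (unZipStepA data R cL) (some (some n, acc)) =
      some (some n, (List.range j).map (pvDig n cL.toNat) ++ acc) := by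
  intro j
  induction j with
  | zero =>
    intro a acc _ hsum
    have h : PySem.List.pyRange a (R + 1) 1 = [] := by
      rw [PySem.List.pyRange_one]
      have h0 : (R + 1 - a).toNat = 0 := by omega
      simp [h0]
    simp [h]
  | succ j ih =>
    intro a acc ha hsum
    have hlt : a < R + 1 := by omega
    rw [PySem.List.pyRange_one_cons hlt, List.foldl_cons,
        stepA_some data R cL n a acc hcl (by omega) j (by omega),
        ih (a + 1) _ (by omega) (by omega), List.range_succ]
    simp

theorem mergeFold (L : List Int) (hlen : L.length ≤ 24) :
    ∀ (j : Nat) (a : Int) (acc : List Int), 0 ≤ a → a + j = L.length →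
    (PySem.List.pyRange a (L.length : Int) 1).foldl
      (fun c? i => c?.bind fun c =>
        (PySem.List.pyGet? L i).bind fun ai =>
        (PySem.List.pyGet? encryptionVectorList i).bind fun bi =>
        some (c ++ [ai + bi * 1])) (some acc) =
      some (acc ++ (List.range j).map
        (fun p => L.getD (a.toNat + p) 0 + encryptionVectorList.getD (a.toNat + p) 0)) := by
  intro j
  induction j with
  | zero =>
    intro a acc _ hsum
    have h : PySem.List.pyRange a (L.length : Int) 1 = [] := by
      rw [PySem.List.pyRange_one]
      have h0 : ((L.length : Int) - a).toNat = 0 := by omega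
      simp [h0]
    simp [h]
  | succ j ih =>
    intro a acc h0 hsum
    have hlt : a < (L.length : Int) := by omega
    have hacast : a = ((a.toNat : Nat) : Int) := by omega
    have hb : a.toNat < L.length := by omega
    have hLget : PySem.List.pyGet? L a = some (L.getD a.toNat 0) := by
      conv_lhs => rw [hacast]
      rw [PySem.List.pyGet?_natCast, List.getElem?_eq_getElem hb,
          List.getD_eq_getElem?_getD, List.getElem?_eq_getElem hb]
      rfl
    have hEget := evl_get a h0 (by omega)
    rw [PySem.List.pyRange_one_cons hlt, List.foldl_cons]
    simp only [Option.bind_some, hLget, hEget]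
    rw [ih (a + 1) _ (by omega) (by omega), List.range_succ_eq_map]
    simp only [List.map_cons, List.map_map, List.append_assoc,
      List.singleton_append, mul_one, Option.some.injEq, Nat.add_zero]
    refine congrArg₂ _ rfl (congrArg₂ _ rfl ?_)
    apply List.map_congr_left
    intro p _
    have hidx : (a + 1).toNat + p = a.toNat + (p + 1) := by omega
    simp [Function.comp, hidx]

-- B's loop
theorem foldB (R : Int) (c : Int) (hc : 0 < c) (hR : R ≤ 24) :
    ∀ (j : Nat) (a n : Int) (acc : List Int), 0 ≤ a → a + j = R →
    (PySem.List.pyRange a R 1).foldl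
      (fun st i => st.bind fun s =>
        (PySem.List.pyGet? encryptionVectorList i).bind fun e =>
        some (PySem.Int.floordiv s.1 c, s.2 ++ [e + PySem.Int.mod s.1 c]))
      (some (n, acc)) =
      some (n / c ^ j, acc ++ (List.range j).map
        (fun p => encryptionVectorList.getD (a.toNat + p) 0 + PySem.Int.mod (n / c ^ p) c)) := by
  intro j
  induction j with
  | zero =>
    intro a n acc _ hsum
    have h : PySem.List.pyRange a R 1 = [] := by
      rw [PySem.List.pyRange_one]
      have h0 : (R - a).toNat = 0 := by omega
      simp [h0]
    simp [h]
  | succ j ih =>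
    intro a n acc h0 hsum
    have hlt : a < R := by omega
    have hEget := evl_get a h0 (by omega)
    rw [PySem.List.pyRange_one_cons hlt, List.foldl_cons]
    simp only [Option.bind_some, hEget]
    rw [ih (a + 1) _ _ (by omega) (by omega), List.range_succ_eq_map]
    have hfd : PySem.Int.floordiv n c = n / c := PySem.Int.floordiv_eq_ediv_of_pos hc
    have hdd : ∀ (p : Nat), n / c / c ^ p = n / c ^ (p + 1) := by
      intro p
      rw [Int.ediv_ediv_of_nonneg (le_of_lt hc), ← pow_succ']
    simp only [hfd, hdd, List.map_cons, List.map_map, List.append_assoc,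
      List.singleton_append, pow_zero, Int.ediv_one, Nat.add_zero, Option.some.injEq,
      Prod.mk.injEq]
    refine ⟨trivial, congrArg₂ _ rfl (congrArg₂ _ rfl ?_)⟩
    apply List.map_congr_left
    intro p _
    have hidx : (a + 1).toNat + p = a.toNat + (p + 1) := by omega
    simp [Function.comp, hidx]

-- ===== VERDICT (by name: the statement is the Claim_ definition above) =====
theorem unZipSolarTermsList_spec : Claim_equal_unZipSolarTermsList := by
  intro data R cL _ hpre
  unfold Spec_unZipSolarTermsList
  rcases hpre with hR0 | ⟨hR24, hcl, hsome⟩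
  · -- rangeEndNum < 1: A's loop and B both produce []
    have h : PySem.List.pyRange 1 (R + 1) 1 = [] := by
      rw [PySem.List.pyRange_one]
      simp
      omega
    have hnR : ¬ (1 ≤ R) := by omega
    have hB : unZipSolarTermsList_alt data R cL = [] := by
      unfold unZipSolarTermsList_alt
      rw [if_neg hnR]
    rw [hB]
    unfold unZipSolarTermsList
    rw [h]
    rfl
  · rcases Option.isSome_iff_exists.mp hsome with ⟨n, hn⟩
    by_cases hR1 : 1 ≤ R
    case neg =>
      have h : PySem.List.pyRange 1 (R + 1) 1 = [] := by
        rw [PySem.List.pyRange_one]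
        simp
        omega
      have hB : unZipSolarTermsList_alt data R cL = [] := by
        unfold unZipSolarTermsList_alt
        rw [if_neg hR1]
      rw [hB]
      unfold unZipSolarTermsList
      rw [h]
      rfl
    case pos =>
    set t := cL.toNat with ht
    set m := R.toNat with hm
    have hm1 : 1 ≤ m := by omega
    -- A's loop: first iteration converts, rest via foldA
    have hcons : PySem.List.pyRange 1 (R + 1) 1 = 1 :: PySem.List.pyRange 2 (R + 1) 1 :=
      PySem.List.pyRange_one_cons (by omega)
    have hstep1 : unZipStepA data R cL (some (none, [])) 1 =
        some (some n, pvDig n t (m - 1) :: []) := by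
      have h2 := stepA_some data R cL n 1 [] hcl (by omega) (m - 1) (by omega)
      -- transfer the some-state step to the none-state start via the parse hypothesis
      simpa [unZipStepA, hn] using h2
    have hloopA : (PySem.List.pyRange 1 (R + 1) 1).foldl
        (unZipStepA data R cL) (some (none, [])) =
        some (some n, (List.range m).map (pvDig n t)) := by
      rw [hcons, List.foldl_cons, hstep1,
          foldA data R cL n hcl (m - 1) 2 [pvDig n t (m - 1)] (by omega) (by omega)]
      have hsplit : (List.range (m - 1)).map (pvDig n t) ++ [pvDig n t (m - 1)] =
          (List.range m).map (pvDig n t) := by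
        conv_rhs => rw [show m = m - 1 + 1 from by omega]
        rw [List.range_succ, List.map_append]
        simp
      rw [hsplit]
    set L : List Int := (List.range m).map (pvDig n t) with hL
    have hLlen : L.length = m := by simp [hL]
    have hA : unZipSolarTermsList data R cL =
        (List.range m).map (fun p => L.getD p 0 + encryptionVectorList.getD p 0) := by
      unfold unZipSolarTermsList
      rw [hloopA]
      have hmerge := mergeFold L (by rw [hLlen]; omega) m 0 [] (by omega) (by simp [hLlen])
      simp only [Int.toNat_zero, Nat.zero_add, List.nil_append, hLlen] at hmerge
      show (abListMerge L encryptionVectorList 1).getD [] = _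
      unfold abListMerge
      rw [hLlen, hmerge]
      rfl

    -- B
    set c : Int := 2 ^ t with hcdef
    have hc : 0 < c := by positivity
    have hB : unZipSolarTermsList_alt data R cL =
        (List.range m).map
          (fun p => encryptionVectorList.getD p 0 + PySem.Int.mod (n / c ^ p) c) := by
      have hfold := foldB R c hc hR24 m 0 n [] (by omega) (by omega)
      simp only [Int.toNat_zero, Nat.zero_add, List.nil_append] at hfold
      unfold unZipSolarTermsList_alt
      rw [if_pos hR1]
      split
      · next heq =>
        rw [hn] at heq
        exact absurd heq (by simp)
      · next n0 heq =>
        rw [hn] at heq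
        have hn0 : n0 = n := by injection heq with h; exact h.symm
        subst hn0
        simp only [letFun]
        rw [← ht, ← hcdef]
        rw [hfold]
    rw [hA, hB]
    apply List.map_congr_left
    intro p hp
    have hdig : pvDig n t p = PySem.Int.mod (n / c ^ p) c := by
      rw [pvDig, Int.shiftRight_eq_div_pow, hcdef, ← pow_mul]
      push_cast
      rfl
    have hLget : L.getD p 0 = pvDig n t p := by
      have hpm : p < m := List.mem_range.mp hp
      simp [hL, List.getD_eq_getElem?_getD, List.getElem?_map, List.getElem?_range, hpm]
    rw [hLget, hdig, add_comm]
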